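-- pv_equiv track=rewrite | github.com/krishvatech/ai_textile_agent | app/core/product_pick_.py | _pick_from_allowed
-- ===== SOURCE A (Python) =====
-- def _pick_from_allowed(text_lc: str, allowed: list[str] | None) -> str | None:
--     """Pick the best (longest) token from allowed that appears in text_lc."""
--     if not text_lc or not allowed:
--         return None
--     ordered = sorted(allowed, key=lambda x: len(x or ""), reverse=True)
--     for token in ordered:
--         if token and token.lower() in text_lc:
--             return token
--     return None
-- ===== SOURCE B (Python) =====
-- def _pick_from_allowed(text_lc: str, allowed: list[str] | None) -> str | None:
--     """Pick the best (longest) token from allowed that appears in text_lc."""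
--     if not text_lc or not allowed:
--         return None
--     best = None
--     for token in allowed:
--         if token and (best is None or len(token) > len(best)) \
--                 and token.lower() in text_lc:
--             best = token
--     return best
-- ===== Notes on version B (the rewrite author's own statement) =====
-- stated objective: alternative
-- what changed: Replaces the stable descending sort plus first-match scan by a single pass over allowed keeping a running longest match (strict > preserves the stable sort's earliest-tie behaviour), running the containment test only for tokens longer than the current best.
import Mathlib
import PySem

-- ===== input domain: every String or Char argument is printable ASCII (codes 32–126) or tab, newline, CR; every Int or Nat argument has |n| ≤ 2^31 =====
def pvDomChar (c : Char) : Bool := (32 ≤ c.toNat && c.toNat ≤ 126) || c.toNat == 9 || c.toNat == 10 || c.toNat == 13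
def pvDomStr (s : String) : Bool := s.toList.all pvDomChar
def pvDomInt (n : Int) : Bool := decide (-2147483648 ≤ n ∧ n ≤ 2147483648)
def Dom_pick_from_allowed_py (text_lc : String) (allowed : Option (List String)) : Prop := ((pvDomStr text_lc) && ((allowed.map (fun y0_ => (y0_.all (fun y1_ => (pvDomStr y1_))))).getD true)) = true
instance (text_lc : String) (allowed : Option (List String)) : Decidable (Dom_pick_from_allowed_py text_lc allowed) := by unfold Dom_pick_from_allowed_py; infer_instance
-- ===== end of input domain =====

-- B replaces A's stable descending sort + first-match scan by a single pass keeping the running longest matching token (simpler, one traversal).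


-- ===== PORT A =====
-- the 'for token in ordered: if token and token.lower() in text_lc: return token' loop
def pickA_loop (text_lc : String) : List String → Option String
  | [] => none
  | token :: rest =>
      if (token != "") && PySem.Str.isIn (PySem.Str.lower token) text_lc then some token
      else pickA_loop text_lc rest

def pick_from_allowed_py (text_lc : String) (allowed : Option (List String)) : Option String :=
  if text_lc = "" then none
  else
    match allowed with
    | none => none
    | some xs =>
      if xs = [] then none
      else
        -- key=lambda x: len(x or "") is len(x) on strings; reverse=True
        pickA_loop text_lc (PySem.List.sorted xs (fun x => PySem.Str.len x) true)

-- ===== PORT B =====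
def pick_from_allowed_py_alt (text_lc : String) (allowed : Option (List String)) : Option String :=
  if text_lc = "" then none
  else
    match allowed with
    | none => none
    | some xs =>
      if xs = [] then none
      else
        -- only run the containment test when the token could beat the current best
        xs.foldl (fun best token =>
          if (token != "")
              && (match best with
                  | none => true
                  | some b => decide (PySem.Str.len token > PySem.Str.len b))
              && PySem.Str.isIn (PySem.Str.lower token) text_lc
          then some token else best) none

-- ===== PRECONDITION & SPEC =====
def Spec_pick_from_allowed_py (text_lc : String) (allowed : Option (List String)) (out : Option String) : Prop := out = pick_from_allowed_py_alt text_lc allowed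
instance (text_lc : String) (allowed : Option (List String)) (out : Option String) : Decidable (Spec_pick_from_allowed_py text_lc allowed out) := by unfold Spec_pick_from_allowed_py; infer_instance

-- ===== CLAIM (what is proved, stated in full; the proofs are below) =====
def Claim_equal_pick_from_allowed_py : Prop := ∀ (text_lc : String) (allowed : Option (List String)), Dom_pick_from_allowed_py text_lc allowed → Spec_pick_from_allowed_py text_lc allowed (pick_from_allowed_py text_lc allowed)

-- ===== LEMMAS AND PROOFS =====

-- generic "first element satisfying p" (the shape of A's for-loop)
def pvFind (p : String → Bool) : List String → Option String
  | [] => none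
  | t :: r => if p t then some t else pvFind p r

theorem pickA_loop_eq_pvFind (text_lc : String) (l : List String) :
    pickA_loop text_lc l =
      pvFind (fun token => (token != "") && PySem.Str.isIn (PySem.Str.lower token) text_lc) l := by
  induction l with
  | nil => rfl
  | cons t r ih =>
    show (if _ then _ else _) = (if _ then _ else _)
    rw [ih]

theorem pvFind_mem (p : String → Bool) : ∀ (l : List String) (m : String),
    pvFind p l = some m → m ∈ l
  | t :: r, m, h => by
    by_cases hp : p t = true
    · simp only [pvFind, hp, if_true] at h
      cases h; exact List.mem_cons_self
    · simp only [pvFind, hp, if_false, Bool.false_eq_true] at h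
      exact List.mem_cons_of_mem _ (pvFind_mem p r m h)

-- inserting x after all elements of key ≥ k x (what insertBy with the reverse comparator does
-- on a descending list): the first match becomes x exactly when x matches and strictly beats
-- the old first match
theorem pvFind_insertBy (p : String → Bool) (k : String → Int) (x : String) :
    ∀ l : List String, l.Pairwise (fun a b => k b ≤ k a) →
    pvFind p (PySem.List.insertBy (fun a b => decide (k b < k a)) x l) =
      (if p x then
        match pvFind p l with
        | none => some x
        | some m => if k x > k m then some x else some m
      else pvFind p l)
  | [], _ => by
    cases hp : p x <;> simp [PySem.List.insertBy, pvFind, hp]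
  | y :: ys, hl => by
    have hy : ∀ m ∈ ys, k m ≤ k y := (List.pairwise_cons.mp hl).1
    have hys := (List.pairwise_cons.mp hl).2
    by_cases hb : k y < k x
    · rw [show PySem.List.insertBy (fun a b => decide (k b < k a)) x (y :: ys) = x :: y :: ys
          from by simp [PySem.List.insertBy, hb]]
      cases hp : p x
      · simp [pvFind, hp]
      · rw [show pvFind p (x :: y :: ys) = some x from by simp [pvFind, hp]]
        simp only [if_true]
        cases hfind : pvFind p (y :: ys) with
        | none => rfl
        | some m =>
          have hm : m ∈ y :: ys := pvFind_mem p _ m hfind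
          have hle : k m ≤ k y := by
            rcases List.mem_cons.mp hm with h | h
            · subst h; exact le_refl _
            · exact hy m h
          have hlt : k m < k x := lt_of_le_of_lt hle hb
          simp [hlt]
    · rw [show PySem.List.insertBy (fun a b => decide (k b < k a)) x (y :: ys)
            = y :: PySem.List.insertBy (fun a b => decide (k b < k a)) x ys
          from by simp [PySem.List.insertBy, hb]]
      cases hp : p y
      · simp only [pvFind, hp, if_false, Bool.false_eq_true]
        exact pvFind_insertBy p k x ys hys
      · have h1 : pvFind p (y :: PySem.List.insertBy (fun a b => decide (k b < k a)) x ys)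
            = some y := by simp [pvFind, hp]
        have h2 : pvFind p (y :: ys) = some y := by simp [pvFind, hp]
        cases hpx : p x
        · rw [h1]; simp [h2]
        · rw [h1]; simp [h2, hb]

-- the core equivalence on the raw token list, for any predicate and integer key
theorem pvFind_sorted (p : String → Bool) (k : String → Int) (xs : List String) :
    pvFind p (PySem.List.sorted xs k true) =
      xs.foldl (fun best token =>
        if p token then
          match best with
          | none => some token
          | some b => if k token > k b then some token else best
        else best) none := by
  induction xs using List.reverseRecOn with
  | nil => simp [PySem.List.sorted_rev_eq_foldl_insertBy, pvFind]
  | append_singleton ys x ih =>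
    have hsnoc : PySem.List.sorted (ys ++ [x]) k true =
        PySem.List.insertBy (fun a b => decide (k b < k a)) x (PySem.List.sorted ys k true) := by
      rw [PySem.List.sorted_rev_eq_foldl_insertBy, PySem.List.sorted_rev_eq_foldl_insertBy,
        List.foldl_append]
      rfl
    rw [hsnoc,
      pvFind_insertBy p k x _ (PySem.List.sorted_pairwise_rev ys k),
      ih, List.foldl_append]
    cases hp : p x
    · simp [hp]
    · cases hF : ys.foldl (fun best token =>
        if p token then
          match best with
          | none => some token
          | some b => if k token > k b then some token else best
        else best) none with
      | none => simp [hp]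
      | some m => by_cases hgt : k x > k m <;> simp [hp, hgt]

-- ===== VERDICT (by name: the statement is the Claim_ definition above) =====
theorem pick_from_allowed_py_spec : Claim_equal_pick_from_allowed_py := by
  intro text_lc allowed _
  unfold Spec_pick_from_allowed_py pick_from_allowed_py pick_from_allowed_py_alt
  by_cases ht : text_lc = ""
  · simp [ht]
  · simp only [ht, if_false]
    match allowed with
    | none => rfl
    | some xs =>
      by_cases hxs : xs = []
      · simp [hxs]
      · simp only [hxs, if_false]
        rw [pickA_loop_eq_pvFind,
          pvFind_sorted
            (fun token => (token != "") && PySem.Str.isIn (PySem.Str.lower token) text_lc)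
            (fun x => PySem.Str.len x) xs]
        exact PySem.List.foldl_congr_mem xs _ _ none (fun best token _ => by
          cases best with
          | none =>
            cases htok : token != "" <;>
              cases hin : PySem.Str.isIn (PySem.Str.lower token) text_lc <;>
                simp [*]
          | some b =>
            cases htok : token != "" <;>
              cases hin : PySem.Str.isIn (PySem.Str.lower token) text_lc <;>
                by_cases hgt : PySem.Str.len token > PySem.Str.len b <;>
                  simp [*])
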